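-- pv_equiv track=rewrite | github.com/ShakunAnastasia/algorithms_and_data_structures | homework/hw17/t_17_05_e0468.py | validate_bst_path
-- ===== SOURCE A (Python) =====
-- def validate_bst_path(path, index, low, high):
--     if index == len(path):
--         return True
--
--     current_val = path[index]
--
--     if not (low < current_val < high):
--         return False
--
--     if index + 1 < len(path):
--         next_val = path[index + 1]
--         if next_val < current_val:
--             return validate_bst_path(path, index + 1, low, current_val)
--         else:
--             return validate_bst_path(path, index + 1, current_val, high)
--
--     return True
-- ===== SOURCE B (Python) =====
-- def validate_bst_path(path, index, low, high):
--     n = len(path)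
--     while index < n:
--         current = path[index]
--         if not (low < current < high):
--             return False
--         if index + 1 < n:
--             if path[index + 1] < current:
--                 high = current
--             else:
--                 low = current
--         index += 1
--     return True
-- ===== Notes on version B (the rewrite author's own statement) =====
-- stated objective: alternative
-- what changed: The tail recursion with narrowed-bound recursive calls is replaced by a single iterative while-loop that mutates index/low/high in place (no call stack, no recursion-depth limit).
import Mathlib
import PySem

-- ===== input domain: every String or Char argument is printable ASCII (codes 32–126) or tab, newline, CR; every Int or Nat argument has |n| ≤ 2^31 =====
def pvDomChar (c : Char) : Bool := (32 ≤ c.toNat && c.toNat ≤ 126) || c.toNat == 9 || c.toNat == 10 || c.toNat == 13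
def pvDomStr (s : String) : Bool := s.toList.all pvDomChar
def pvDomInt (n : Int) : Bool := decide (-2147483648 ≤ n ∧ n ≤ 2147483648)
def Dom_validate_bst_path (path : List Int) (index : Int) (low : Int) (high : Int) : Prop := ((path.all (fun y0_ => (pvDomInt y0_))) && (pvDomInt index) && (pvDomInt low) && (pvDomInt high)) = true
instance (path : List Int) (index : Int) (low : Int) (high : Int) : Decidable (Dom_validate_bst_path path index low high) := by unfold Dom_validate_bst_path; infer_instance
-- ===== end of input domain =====

-- B replaces A's tail recursion (narrowed bounds passed to recursive calls) by an iterative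
-- while-loop mutating index/low/high in place; same recurrence, no call stack (objective: alternative).


-- ===== PORT A =====
def validate_bst_path (path : List Int) (index : Int) (low : Int) (high : Int) : Bool :=
  if index = (path.length : Int) then true
  else
    match PySem.List.pyGet? path index with
    | none => false  -- Python raises IndexError here; excluded by Pre_
    | some current_val =>
      if ¬ (low < current_val ∧ current_val < high) then false
      else if _h : index + 1 < (path.length : Int) then
        match PySem.List.pyGet? path (index + 1) with
        | none => false  -- unreachable when the first lookup succeeded
        | some next_val =>
          if next_val < current_val then validate_bst_path path (index + 1) low current_val
          else validate_bst_path path (index + 1) current_val high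
      else true
termination_by ((path.length : Int) - index).toNat
decreasing_by all_goals omega

-- ===== PORT B =====
-- one iteration of the while-loop: read, test, update bounds, increment index, continue
def bstLoop (path : List Int) (n : Int) (index : Int) (low : Int) (high : Int) : Bool :=
  if _h : index < n then
    match PySem.List.pyGet? path index with
    | none => false  -- Python raises IndexError here; excluded by Pre_
    | some current =>
      if ¬ (low < current ∧ current < high) then false
      else
        let bounds :=
          if index + 1 < n then
            match PySem.List.pyGet? path (index + 1) with
            | none => (low, high)  -- unreachable when the first lookup succeeded
            | some nxt => if nxt < current then (low, current) else (current, high)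
          else (low, high)
        bstLoop path n (index + 1) bounds.1 bounds.2
  else true
termination_by (n - index).toNat
decreasing_by omega

def validate_bst_path_alt (path : List Int) (index : Int) (low : Int) (high : Int) : Bool :=
  bstLoop path (path.length : Int) index low high

-- ===== PRECONDITION & SPEC =====
-- Pre_ excludes exactly the inputs where A's path[index] raises IndexError (index past either end).
def Pre_validate_bst_path (path : List Int) (index : Int) (low : Int) (high : Int) : Prop :=
  -(path.length : Int) ≤ index ∧ index ≤ (path.length : Int)
instance (path : List Int) (index : Int) (low : Int) (high : Int) : Decidable (Pre_validate_bst_path path index low high) := by unfold Pre_validate_bst_path; infer_instance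
def pvWitness_validate_bst_path : List Int × Int × Int × Int := ([5, 3, 7], 0, -100, 100)


def Spec_validate_bst_path (path : List Int) (index : Int) (low : Int) (high : Int) (out : Bool) : Prop := out = validate_bst_path_alt path index low high
instance (path : List Int) (index : Int) (low : Int) (high : Int) (out : Bool) : Decidable (Spec_validate_bst_path path index low high out) := by unfold Spec_validate_bst_path; infer_instance

-- ===== CLAIM (what is proved, stated in full; the proofs are below) =====
def Claim_equal_validate_bst_path : Prop := ∀ (path : List Int) (index : Int) (low : Int) (high : Int), Dom_validate_bst_path path index low high → Pre_validate_bst_path path index low high → Spec_validate_bst_path path index low high (validate_bst_path path index low high)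

-- ===== LEMMAS AND PROOFS =====

lemma bstLoop_at_end (path : List Int) (low high : Int) :
    bstLoop path (path.length : Int) (path.length : Int) low high = true := by
  rw [bstLoop]; simp

lemma key (k : Nat) : ∀ (path : List Int) (index low high : Int),
    -(path.length : Int) ≤ index → index ≤ (path.length : Int) →
    (((path.length : Int) - index).toNat = k) →
    validate_bst_path path index low high = bstLoop path (path.length : Int) index low high := by
  induction k with
  | zero =>
    intro path index low high h1 h2 hk
    have : index = (path.length : Int) := by omega
    subst this
    rw [validate_bst_path, bstLoop]; simp
  | succ k ih =>
    intro path index low high h1 h2 hk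
    have hlt : index < (path.length : Int) := by omega
    have hne : index ≠ (path.length : Int) := by omega
    obtain ⟨c, hc⟩ : ∃ c, PySem.List.pyGet? path index = some c := by
      rcases h : PySem.List.pyGet? path index with _ | c
      · rw [PySem.List.pyGet?_eq_none_iff, PySem.Raise.InRange] at h; omega
      · exact ⟨c, rfl⟩
    rw [validate_bst_path, bstLoop]
    simp only [hne, if_false, dif_pos hlt, hc]
    by_cases hb : low < c ∧ c < high
    · simp only [hb]
      by_cases hn : index + 1 < (path.length : Int)
      · obtain ⟨d, hd⟩ : ∃ d, PySem.List.pyGet? path (index + 1) = some d := by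
          rcases h : PySem.List.pyGet? path (index + 1) with _ | d
          · rw [PySem.List.pyGet?_eq_none_iff, PySem.Raise.InRange] at h; omega
          · exact ⟨d, rfl⟩
        simp only [dif_pos hn, if_pos hn, hd]
        by_cases hdc : d < c
        · simp only [hdc, if_pos]
          exact ih path (index + 1) low c (by omega) (by omega) (by omega)
        · simp only [hdc, if_false]
          exact ih path (index + 1) c high (by omega) (by omega) (by omega)
      · have heq : index + 1 = (path.length : Int) := by omega
        simp [heq, bstLoop_at_end]
    · simp [hb]

-- ===== VERDICT (by name: the statement is the Claim_ definition above) =====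
theorem validate_bst_path_spec : Claim_equal_validate_bst_path := by
  intro path index low high _ hpre
  unfold Spec_validate_bst_path validate_bst_path_alt
  exact key (((path.length : Int) - index).toNat) path index low high hpre.1 hpre.2 rfl
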